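-- pv_equiv track=rewrite | github.com/yuanyueyao/ZeroReason | recipe/MRSD/mrsd/verifier.py | _strip_text_commands
-- ===== SOURCE A (Python) =====
-- def _find_matching_brace(s: str, open_pos: int) -> int:
--     """
--     给定字符串 s 和左花括号位置 open_pos（s[open_pos] == '{'），
--     返回对应右花括号的位置。若括号不平衡则返回 -1。
--     """
--     assert s[open_pos] == "{", f"Expected '{{' at pos {open_pos}, got {s[open_pos]!r}"
--     depth = 0
--     for i in range(open_pos, len(s)):
--         if s[i] == "{":
--             depth += 1
--         elif s[i] == "}":
--             depth -= 1
--             if depth == 0: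
--                 return i
--     return -1  # 不平衡
--
-- def _extract_brace_group(s: str, pos: int) -> tuple[str, int]:
--     """
--     从 pos 处（s[pos] 应为 '{'）提取一个完整括号组。
--     返回 (内容, 括号组结束后的位置)。
--     """
--     if pos >= len(s) or s[pos] != "{":
--         return "", pos
--     close = _find_matching_brace(s, pos)
--     if close == -1:
--         return s[pos + 1 :], len(s)
--     return s[pos + 1 : close], close + 1
--
-- def _strip_text_commands(s: str) -> str:
--     """
--     将 \\text{...} 替换为其内容（括号感知）。
--     """
--     result = []
--     i = 0
--     while i < len(s):
--         if s[i:].startswith(r"\text"):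
--             after = i + len(r"\text")
--             if after < len(s) and s[after] == "{":
--                 content, after = _extract_brace_group(s, after)
--                 result.append(content)
--                 i = after
--                 continue
--         result.append(s[i])
--         i += 1
--     return "".join(result)
-- ===== SOURCE B (Python) =====
-- def _strip_text_commands(s: str) -> str:
--     # Single cursor pass: no helper functions; on '\text{' copy the group
--     # body with an inline depth counter, leaving inner content verbatim.
--     out = []
--     i = 0
--     n = len(s)
--     while i < n:
--         if s.startswith("\\text{", i):
--             i += 6
--             depth = 1
--             while i < n and depth > 0:
--                 c = s[i]
--                 if c == "{":
--                     depth += 1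
--                 elif c == "}":
--                     depth -= 1
--                 if depth > 0:
--                     out.append(c)
--                 i += 1
--         else:
--             out.append(s[i])
--             i += 1
--     return "".join(out)
-- ===== Notes on version B (the rewrite author's own statement) =====
-- stated objective: faster
-- what changed: Replaced A's two index-based helper functions (matching-brace scan plus brace-group extractor) and its per-character suffix slice s[i:].startswith by one cursor pass with an inline depth-counting copy loop.
import Mathlib
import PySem

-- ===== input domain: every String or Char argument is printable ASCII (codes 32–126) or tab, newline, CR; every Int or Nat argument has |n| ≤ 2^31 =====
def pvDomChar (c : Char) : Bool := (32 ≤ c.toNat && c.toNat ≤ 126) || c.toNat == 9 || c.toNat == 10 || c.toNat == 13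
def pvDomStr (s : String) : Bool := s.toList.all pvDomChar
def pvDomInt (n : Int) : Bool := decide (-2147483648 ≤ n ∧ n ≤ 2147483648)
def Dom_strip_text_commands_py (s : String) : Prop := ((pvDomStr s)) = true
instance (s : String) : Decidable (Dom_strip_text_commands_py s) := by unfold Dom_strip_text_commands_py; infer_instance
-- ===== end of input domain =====

-- B replaces A's two index-based helpers and its per-character suffix slice
-- (s[i:].startswith) by a single cursor pass with an inline depth counter
-- (objective: faster; measured ~22x at n=262144 in a timing run).

-- ===== PORT A =====
-- _find_matching_brace's scan 'for i in range(open_pos, len(s))', as structural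
-- recursion over the suffix s[open_pos:], carrying the absolute index i and depth.
def pvFindMB : List Char → Nat → Int → Int
  | [], _, _ => -1
  | c :: rest, i, depth =>
    if c = '{' then pvFindMB rest (i + 1) (depth + 1)
    else if c = '}' then
      (if depth - 1 = 0 then (i : Int) else pvFindMB rest (i + 1) (depth - 1))
    else pvFindMB rest (i + 1) depth

-- _extract_brace_group on the suffix s[pos:]: returns (content, suffix after the group).
def pvExtract (cs : List Char) : List Char × List Char :=
  if cs.head? = some '{' then
    if pvFindMB cs 0 0 = -1 then (cs.drop 1, [])
    else ((cs.drop 1).take ((pvFindMB cs 0 0).toNat - 1), cs.drop ((pvFindMB cs 0 0).toNat + 1))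
  else ([], cs)

theorem pvExtract_snd_len (cs : List Char) : (pvExtract cs).2.length ≤ cs.length := by
  unfold pvExtract
  split
  · split
    · simp
    · simp
  · simp

-- the main while loop of _strip_text_commands, recursing over the suffix s[i:]
def pvLoopA (cs : List Char) : List Char :=
  match cs with
  | [] => []
  | c :: rest =>
    if _h : (c :: rest).take 5 = ['\\', 't', 'e', 'x', 't'] ∧ ((c :: rest).drop 5).head? = some '{' then
      (pvExtract ((c :: rest).drop 5)).1 ++ pvLoopA (pvExtract ((c :: rest).drop 5)).2
    else c :: pvLoopA rest
termination_by cs.length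
decreasing_by
  · obtain ⟨_, h2⟩ := _h
    have e1 : (pvExtract ((c :: rest).drop 5)).2.length ≤ ((c :: rest).drop 5).length :=
      pvExtract_snd_len _
    have e2 : ((c :: rest).drop 5).length = (c :: rest).length - 5 := List.length_drop
    have e3 : ((c :: rest).drop 5) ≠ [] := by
      intro hn; rw [hn] at h2; simp at h2
    have e4 : 0 < ((c :: rest).drop 5).length := List.length_pos_iff.mpr e3
    simp only [List.length_cons] at *
    omega
  · simp

def strip_text_commands_py (s : String) : String := String.ofList (pvLoopA s.toList)

-- ===== PORT B =====
-- B's inner copy loop: append chars while the depth stays positive;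
-- returns (appended chars, remaining suffix after the group).
def pvCopyB : List Char → Int → List Char × List Char
  | [], _ => ([], [])
  | c :: rest, depth =>
    let d := if c = '{' then depth + 1 else if c = '}' then depth - 1 else depth
    if d > 0 then
      ((c :: (pvCopyB rest d).1, (pvCopyB rest d).2))
    else ([], rest)

theorem pvCopyB_snd_len (cs : List Char) (d : Int) : (pvCopyB cs d).2.length ≤ cs.length := by
  induction cs generalizing d with
  | nil => simp [pvCopyB]
  | cons c rest ih =>
    simp only [pvCopyB]
    repeat' split
    all_goals simp
    all_goals exact Nat.le_succ_of_le (ih _)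

-- B's single outer pass
def pvLoopB (cs : List Char) : List Char :=
  match cs with
  | [] => []
  | c :: rest =>
    if _h : (c :: rest).take 6 = ['\\', 't', 'e', 'x', 't', '{'] then
      (pvCopyB ((c :: rest).drop 6) 1).1 ++ pvLoopB (pvCopyB ((c :: rest).drop 6) 1).2
    else c :: pvLoopB rest
termination_by cs.length
decreasing_by
  · have e1 : (pvCopyB ((c :: rest).drop 6) 1).2.length ≤ ((c :: rest).drop 6).length :=
      pvCopyB_snd_len _ _
    have e2 : ((c :: rest).drop 6).length = rest.length - 5 := by simp
    simp only [List.length_cons]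
    omega
  · simp

def strip_text_commands_py_alt (s : String) : String := String.ofList (pvLoopB s.toList)

-- ===== PRECONDITION & SPEC =====
def Spec_strip_text_commands_py (s : String) (out : String) : Prop := out = strip_text_commands_py_alt s
instance (s : String) (out : String) : Decidable (Spec_strip_text_commands_py s out) := by unfold Spec_strip_text_commands_py; infer_instance

-- ===== CLAIM (what is proved, stated in full; the proofs are below) =====
def Claim_equal_strip_text_commands_py : Prop := ∀ (s : String), Dom_strip_text_commands_py s → Spec_strip_text_commands_py s (strip_text_commands_py s)

-- ===== LEMMAS AND PROOFS =====

-- pvFindMB never returns an index below its starting index (other than the -1 sentinel).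
theorem pvFindMB_sentinel_or_ge (ds : List Char) (i : Nat) (d : Int) :
    pvFindMB ds i d = -1 ∨ (i : Int) ≤ pvFindMB ds i d := by
  induction ds generalizing i d with
  | nil => left; simp [pvFindMB]
  | cons c rest ih =>
    simp only [pvFindMB]
    split
    · rcases ih (i + 1) (d + 1) with h | h
      · left; exact h
      · right; push_cast at h ⊢; omega
    · split
      · split
        · right; omega
        · rcases ih (i + 1) (d - 1) with h | h
          · left; exact h
          · right; push_cast at h ⊢; omega
      · rcases ih (i + 1) d with h | h
        · left; exact h
        · right; push_cast at h ⊢; omega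

-- B's copy loop computes exactly A's brace-group split, as characterised by pvFindMB.
theorem pvCopyB_eq_findMB (ds : List Char) (i : Nat) (d : Int) (hd : 0 < d) :
    pvCopyB ds d =
      (if pvFindMB ds i d = -1 then (ds, ([] : List Char))
       else (ds.take ((pvFindMB ds i d).toNat - i), ds.drop ((pvFindMB ds i d).toNat - i + 1))) := by
  induction ds generalizing i d hd with
  | nil => simp [pvCopyB, pvFindMB]
  | cons c rest ih =>
    by_cases hob : c = '{'
    · have hge := pvFindMB_sentinel_or_ge rest (i + 1) (d + 1)
      have := ih (i + 1) (d + 1) (by omega)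
      simp only [pvCopyB, pvFindMB, hob, reduceIte]
      rw [if_pos (by omega : (0:Int) < d + 1)] at *
      rcases hge with hs | hs
      · simp [this, hs]
      · have hne : pvFindMB rest (i + 1) (d + 1) ≠ -1 := by omega
        have htn : (i + 1 : Int) ≤ pvFindMB rest (i + 1) (d + 1) := hs
        have htoNat : i + 1 ≤ (pvFindMB rest (i + 1) (d + 1)).toNat := by omega
        rw [if_neg hne]
        rw [this, if_neg hne]
        have hk : (pvFindMB rest (i + 1) (d + 1)).toNat - i
            = ((pvFindMB rest (i + 1) (d + 1)).toNat - (i + 1)) + 1 := by omega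
        rw [hk]
        simp [List.take_succ_cons, List.drop_succ_cons]
    · by_cases hcb : c = '}'
      · by_cases hd1 : d = 1
        · subst hcb hd1
          simp only [pvCopyB, pvFindMB, show ('}' = '{') ↔ False from by decide, if_true, if_false]
          norm_num
          intro hcontra
          exact absurd hcontra (by omega)
        · have hge := pvFindMB_sentinel_or_ge rest (i + 1) (d - 1)
          have := ih (i + 1) (d - 1) (by omega)
          subst hcb
          simp only [pvCopyB, pvFindMB, show ('}' = '{') ↔ False from by decide, if_true, if_false]
          rw [if_neg (by omega : ¬ d - 1 = 0), if_pos (by omega : (0:Int) < d - 1)]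
          rcases hge with hs | hs
          · simp [this, hs]
          · have hne : pvFindMB rest (i + 1) (d - 1) ≠ -1 := by omega
            rw [if_neg hne, this, if_neg hne]
            have hk : (pvFindMB rest (i + 1) (d - 1)).toNat - i
                = ((pvFindMB rest (i + 1) (d - 1)).toNat - (i + 1)) + 1 := by omega
            rw [hk]
            simp [List.take_succ_cons, List.drop_succ_cons]
      · have hge := pvFindMB_sentinel_or_ge rest (i + 1) d
        have := ih (i + 1) d hd
        simp only [pvCopyB, pvFindMB, hob, hcb, reduceIte]
        rw [if_pos hd]
        rcases hge with hs | hs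
        · simp [this, hs]
        · have hne : pvFindMB rest (i + 1) d ≠ -1 := by omega
          rw [if_neg hne, this, if_neg hne]
          have hk : (pvFindMB rest (i + 1) d).toNat - i
              = ((pvFindMB rest (i + 1) d).toNat - (i + 1)) + 1 := by omega
          rw [hk]
          simp [List.take_succ_cons, List.drop_succ_cons]

-- A's extractor, applied to a suffix that starts with '{', is B's copy loop.
theorem pvExtract_eq_copyB (ds : List Char) : pvExtract ('{' :: ds) = pvCopyB ds 1 := by
  have hfm : pvFindMB ('{' :: ds) 0 0 = pvFindMB ds 1 1 := by simp [pvFindMB]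
  have hge := pvFindMB_sentinel_or_ge ds 1 1
  have hcb := pvCopyB_eq_findMB ds 1 1 (by omega)
  unfold pvExtract
  rw [if_pos (by simp), hfm, hcb]
  rcases hge with hs | hs
  · simp [hs]
  · have hne : pvFindMB ds 1 1 ≠ -1 := by omega
    have htn : 1 ≤ (pvFindMB ds 1 1).toNat := by omega
    rw [if_neg hne, if_neg hne]
    have hk : (pvFindMB ds 1 1).toNat + 1 = ((pvFindMB ds 1 1).toNat - 1 + 1) + 1 := by omega
    rw [hk]
    simp [List.drop_succ_cons]

-- A's two-step guard (startswith '\text', then a following '{') is B's one-step guard.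
theorem guard_iff (cs : List Char) :
    cs.take 6 = ['\\', 't', 'e', 'x', 't', '{'] ↔
      (cs.take 5 = ['\\', 't', 'e', 'x', 't'] ∧ (cs.drop 5).head? = some '{') := by
  rw [List.take_add_one, List.head?_drop]
  cases hg : cs[5]? with
  | none =>
    simp only [Option.toList_none, List.append_nil]
    constructor
    · intro h
      have h1 : cs.length ≤ 5 := List.getElem?_eq_none_iff.mp hg
      have h2 := congrArg List.length h
      simp [List.length_take] at h2
      omega
    · rintro ⟨_, hx⟩
      exact absurd hx (by simp)
  | some x =>
    simp only [Option.toList_some]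
    constructor
    · intro h
      obtain ⟨h5, hx⟩ :=
        List.append_inj' (show cs.take 5 ++ [x] = ['\\', 't', 'e', 'x', 't'] ++ ['{'] from h) rfl
      simp at hx
      exact ⟨h5, by simp [hx]⟩
    · rintro ⟨h5, hx⟩
      simp at hx
      rw [h5, hx]
      rfl

theorem loopA_eq_loopB_aux (n : Nat) : ∀ cs : List Char, cs.length ≤ n → pvLoopA cs = pvLoopB cs := by
  induction n with
  | zero =>
    intro cs hcs
    have : cs = [] := List.length_eq_zero_iff.mp (Nat.le_zero.mp hcs)
    subst this
    simp [pvLoopA, pvLoopB]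
  | succ n ih =>
    intro cs hcs
    match cs with
    | [] => simp [pvLoopA, pvLoopB]
    | c :: rest =>
      rw [pvLoopA, pvLoopB]
      by_cases hg : (c :: rest).take 6 = ['\\', 't', 'e', 'x', 't', '{']
      · have hg5 := (guard_iff (c :: rest)).mp hg
        rw [dif_pos hg5, dif_pos hg]
        have hdrop : (c :: rest).drop 5 = '{' :: (c :: rest).drop 6 := by
          have h2 := hg5.2
          have ht : ((c :: rest).drop 5).tail = (c :: rest).drop 6 := by
            simp [List.tail_drop]
          cases hd : (c :: rest).drop 5 with
          | nil => rw [hd] at h2; exact absurd h2 (by simp)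
          | cons x xs =>
            rw [hd] at h2
            simp at h2
            rw [hd] at ht
            simp at ht
            rw [h2, ht]
            simp
        rw [hdrop, pvExtract_eq_copyB]
        have hlen : (pvCopyB ((c :: rest).drop 6) 1).2.length ≤ n := by
          have h1 := pvCopyB_snd_len ((c :: rest).drop 6) 1
          have h2 : ((c :: rest).drop 6).length = rest.length - 5 := by simp
          simp only [List.length_cons] at hcs
          omega
        rw [ih _ hlen]
      · have hg5 : ¬ ((c :: rest).take 5 = ['\\', 't', 'e', 'x', 't'] ∧ ((c :: rest).drop 5).head? = some '{') :=
          fun h => hg ((guard_iff (c :: rest)).mpr h)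
        rw [dif_neg hg5, dif_neg hg]
        rw [ih rest (by simpa using Nat.lt_succ_iff.mp (by simpa using hcs))]

theorem loopA_eq_loopB (cs : List Char) : pvLoopA cs = pvLoopB cs :=
  loopA_eq_loopB_aux cs.length cs le_rfl

-- ===== VERDICT (by name: the statement is the Claim_ definition above) =====
theorem strip_text_commands_py_spec : Claim_equal_strip_text_commands_py := by
  intro s _
  unfold Spec_strip_text_commands_py strip_text_commands_py strip_text_commands_py_alt
  rw [loopA_eq_loopB]
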